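-- pv_equiv track=rewrite | github.com/jsdae90/BOJ-algorithm | week2/week2_test_1.py | solution
-- ===== SOURCE A (Python) =====
-- def solution(seat):
--     visited = set()
--
--     for x, y in seat:
--         if (x, y) not in visited:
--             visited.add((x, y))
--         else:
--             continue
--
--     return len(visited)
-- ===== SOURCE B (Python) =====
-- def solution(seat):
--     pts = [(x, y) for x, y in seat]
--     count = 0
--     for i, p in enumerate(pts):
--         if p not in pts[i + 1:]:
--             count += 1
--     return count
-- ===== Notes on version B (the rewrite author's own statement) =====
-- stated objective: alternative
-- what changed: B keeps no visited-set at all: it counts each coordinate whose last occurrence it is, by one suffix-membership test per element, instead of A's hash-set insertion loop.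
import Mathlib
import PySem

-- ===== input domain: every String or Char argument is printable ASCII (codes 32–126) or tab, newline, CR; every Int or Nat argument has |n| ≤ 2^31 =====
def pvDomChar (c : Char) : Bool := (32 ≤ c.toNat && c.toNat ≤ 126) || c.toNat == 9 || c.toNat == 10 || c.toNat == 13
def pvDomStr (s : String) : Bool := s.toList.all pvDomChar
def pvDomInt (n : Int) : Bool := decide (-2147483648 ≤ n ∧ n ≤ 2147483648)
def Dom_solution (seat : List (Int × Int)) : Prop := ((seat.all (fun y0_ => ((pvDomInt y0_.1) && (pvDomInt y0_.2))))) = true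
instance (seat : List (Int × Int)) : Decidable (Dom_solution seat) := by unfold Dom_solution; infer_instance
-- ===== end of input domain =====

-- B counts, for each element, whether its suffix still contains it (last occurrences), with no
-- auxiliary set; an alternative decomposition, not claimed faster (it is quadratic, A is linear).
-- ===== PORT A =====
def solution (seat : List (Int × Int)) : Int :=
  PySem.Set.len
    (seat.foldl
      (fun visited p =>
        if ¬ (PySem.Set.contains visited p) then PySem.Set.add visited p else visited)
      PySem.Set.empty)

-- ===== PORT B =====
-- the loop 'for i, p in enumerate(pts): if p not in pts[i+1:]' visits each head with its tail:
-- structural recursion over the same suffixes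
def solutionAltCount (pts : List (Int × Int)) : Int :=
  match pts with
  | [] => 0
  | p :: rest => (if p ∈ rest then 0 else 1) + solutionAltCount rest

def solution_alt (seat : List (Int × Int)) : Int :=
  solutionAltCount (seat.map (fun q => (q.1, q.2)))

-- ===== PRECONDITION & SPEC =====
def Spec_solution (seat : List (Int × Int)) (out : Int) : Prop := out = solution_alt seat
instance (seat : List (Int × Int)) (out : Int) : Decidable (Spec_solution seat out) := by unfold Spec_solution; infer_instance

-- ===== CLAIM (what is proved, stated in full; the proofs are below) =====
def Claim_equal_solution : Prop := ∀ (seat : List (Int × Int)), Dom_solution seat → Spec_solution seat (solution seat)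

-- ===== LEMMAS AND PROOFS =====

-- A's loop body is extensionally Set.add
lemma solution_body_eq_add (visited : PySem.Set (Int × Int)) (p : Int × Int) :
    (if ¬ (PySem.Set.contains visited p) then PySem.Set.add visited p else visited)
      = PySem.Set.add visited p := by
  unfold PySem.Set.add
  by_cases h : PySem.Set.contains visited p
  · rw [if_neg (not_not_intro h), if_pos h]
  · rw [if_pos h]

lemma solution_eq_ofList_length (seat : List (Int × Int)) :
    solution seat = ((PySem.Set.ofList seat).length : Int) := by
  unfold solution
  have hfold :
      seat.foldl
        (fun visited p =>
          if ¬ (PySem.Set.contains visited p) then PySem.Set.add visited p else visited)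
        PySem.Set.empty
        = seat.foldl PySem.Set.add PySem.Set.empty := by
    simp only [solution_body_eq_add]
  rw [hfold, PySem.Set.empty, ← PySem.Set.ofList_eq_foldl, PySem.Set.len]

lemma ofList_length_eq_dedup_length (l : List (Int × Int)) :
    (PySem.Set.ofList l).length = l.dedup.length := by
  have htf : (PySem.Set.ofList l).toFinset = l.toFinset := by
    ext x; simp [List.mem_toFinset, PySem.Set.mem_ofList]
  calc (PySem.Set.ofList l).length
      = (PySem.Set.ofList l).toFinset.card :=
        (List.toFinset_card_of_nodup (PySem.Set.nodup_ofList l)).symm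
    _ = l.toFinset.card := by rw [htf]
    _ = l.dedup.length := List.card_toFinset l

lemma altCount_eq_dedup_length (l : List (Int × Int)) :
    solutionAltCount l = (l.dedup.length : Int) := by
  induction l with
  | nil => simp [solutionAltCount]
  | cons p rest ih =>
    by_cases h : p ∈ rest
    · simp [solutionAltCount, h, List.dedup_cons_of_mem h, ih]
    · simp [solutionAltCount, h, List.dedup_cons_of_notMem h, ih]
      omega

-- ===== VERDICT (by name: the statement is the Claim_ definition above) =====
theorem solution_spec : Claim_equal_solution := by
  intro seat _
  unfold Spec_solution solution_alt
  have hmap : seat.map (fun q => (q.1, q.2)) = seat := by simp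
  rw [hmap, solution_eq_ofList_length, ofList_length_eq_dedup_length,
    altCount_eq_dedup_length]
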